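-- pv_equiv track=rewrite | github.com/colin09/Coco | pythonspace/datastructure/d1.py | summ_end
-- ===== SOURCE A (Python) =====
-- def summ_end(lst):
-- 	summ = []
-- 	y = [j for j in range(len(lst[0]))]
-- 	ex = len(lst) - 1
-- 	for m in range(len(y)):
-- 		s = 0
-- 		i = ex
-- 		j = m
-- 		while i>=0 and j <= y[-1]:
-- 			s += lst[i][j]
-- 			if i%2 ==1:
-- 				j = j+1
-- 			else:
-- 				j=j
-- 			i = i-1
-- 		summ.append(s)
-- 	return summ
-- ===== SOURCE B (Python) =====
-- def summ_end(lst):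
--     cols = len(lst[0])
--     summ = [0] * cols
--     offset = 0
--     for i in range(len(lst) - 1, -1, -1):
--         for j, v in enumerate(lst[i]):
--             if offset <= j < cols:
--                 summ[j - offset] += v
--         if i % 2 == 1:
--             offset += 1
--     return summ
-- ===== Notes on version B (the rewrite author's own statement) =====
-- stated objective: alternative
-- what changed: A walks one upward diagonal per start column (a fresh while-loop gather with per-step bounds tests for each output slot); B makes a single bottom-up row-major scatter pass that adds every cell into its owning start-column bucket, maintaining a running offset of odd rows already passed.
import Mathlib
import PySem

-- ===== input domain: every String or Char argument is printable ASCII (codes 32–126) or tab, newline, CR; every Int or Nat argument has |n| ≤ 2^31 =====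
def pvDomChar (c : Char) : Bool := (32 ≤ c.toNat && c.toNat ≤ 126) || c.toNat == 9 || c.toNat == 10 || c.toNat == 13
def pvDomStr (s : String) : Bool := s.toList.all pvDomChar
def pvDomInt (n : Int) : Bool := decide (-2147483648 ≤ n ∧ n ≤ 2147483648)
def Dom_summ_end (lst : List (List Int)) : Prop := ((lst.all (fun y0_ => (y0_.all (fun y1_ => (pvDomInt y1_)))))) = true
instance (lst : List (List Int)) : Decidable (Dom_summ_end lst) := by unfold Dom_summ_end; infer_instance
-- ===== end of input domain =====

-- B replaces A's per-start-column diagonal gather (a fresh bottom-up walk per column) with a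
-- single bottom-up scatter pass over all cells into their owning start-column bucket (objective:
-- alternative decomposition; same asymptotic cost on rectangular input).

-- ===== PORT A =====
-- the while loop: state (s, i, j); fuel bounds the iteration count (i strictly decreases from lst.length-1)
def summEndWhile (lst : List (List Int)) (ylast : Int) : Nat → Int → Int → Int → Int
  | 0, s, _, _ => s
  | fuel+1, s, i, j =>
    if 0 ≤ i ∧ j ≤ ylast then
      summEndWhile lst ylast fuel
        (s + PySem.List.pyGetD (PySem.List.pyGetD lst i []) j 0)
        (i - 1)
        (if PySem.Int.mod i 2 = 1 then j + 1 else j)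
    else s

def summ_end (lst : List (List Int)) : List Int :=
  let y : List Int := PySem.List.pyRange 0 ((PySem.List.pyGetD lst 0 []).length : Int) 1
  let ex : Int := (lst.length : Int) - 1
  (PySem.List.pyRange 0 (y.length : Int) 1).foldl
    (fun summ m =>
      summ ++ [summEndWhile lst (PySem.List.pyGetD y (-1) 0) lst.length 0 ex m]) []

-- ===== PORT B =====
-- inner loop: 'for j, v in enumerate(row): if offset <= j < cols: summ[j-offset] += v'
def summEndAltRow (cols offset : Int) (summ row : List Int) : List Int :=
  (PySem.List.enumerate row 0).foldl
    (fun summ jv =>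
      if offset ≤ jv.1 ∧ jv.1 < cols then
        PySem.List.pySetD summ (jv.1 - offset)
          (PySem.List.pyGetD summ (jv.1 - offset) 0 + jv.2)
      else summ) summ

def summ_end_alt (lst : List (List Int)) : List Int :=
  let cols : Int := ((PySem.List.pyGetD lst 0 []).length : Int)
  ((PySem.List.pyRange ((lst.length : Int) - 1) (-1) (-1)).foldl
    (fun st i =>
      (summEndAltRow cols st.2 st.1 (PySem.List.pyGetD lst i []),
       if PySem.Int.mod i 2 = 1 then st.2 + 1 else st.2))
    (List.replicate cols.toNat 0, 0)).1

-- ===== PRECONDITION & SPEC =====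
-- Pre_ excludes exactly the inputs where Python A raises IndexError: the empty matrix (lst[0]),
-- and matrices where some row whose diagonal offset (lst.length/2 - (i+1)/2 odd rows below it)
-- still lies inside the first row's width is shorter than that width (lst[i][j] out of range).
def Pre_summ_end (lst : List (List Int)) : Prop :=
  lst ≠ [] ∧ ∀ i < lst.length,
    (lst.getD 0 []).length ≤ lst.length / 2 - (i + 1) / 2 ∨
    (lst.getD 0 []).length ≤ (lst.getD i []).length
instance (lst : List (List Int)) : Decidable (Pre_summ_end lst) := by
  unfold Pre_summ_end; infer_instance
def pvWitness_summ_end : List (List Int) := [[1, 2], [3, 4], [5, 6]]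
def Spec_summ_end (lst : List (List Int)) (out : List Int) : Prop := out = summ_end_alt lst
instance (lst : List (List Int)) (out : List Int) : Decidable (Spec_summ_end lst out) := by unfold Spec_summ_end; infer_instance

-- ===== CLAIM (what is proved, stated in full; the proofs are below) =====
def Claim_equal_summ_end : Prop := ∀ (lst : List (List Int)), Dom_summ_end lst → Pre_summ_end lst → Spec_summ_end lst (summ_end lst)

-- ===== LEMMAS AND PROOFS =====

-- the cell row i contributes to start column m: offset at row i is n/2 - (i+1)/2
def pvTerm (lst : List (List Int)) (c n m i : Nat) : Int :=
  if m + (n / 2 - (i + 1) / 2) < c then (lst.getD i []).getD (m + (n / 2 - (i + 1) / 2)) 0 else 0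

theorem pvModCast (r : Nat) : PySem.Int.mod (r : Int) 2 = ((r % 2 : Nat) : Int) := by
  rw [PySem.Int.mod_eq_emod_of_pos (by omega)]
  omega

-- A's while loop from state (i = r-1, j = m + offset(r-1)) sums the diagonal terms of rows r-1 … 0
theorem pvALoop (lst : List (List Int)) (c : Nat) :
    ∀ (r fuel : Nat), r ≤ fuel → r ≤ lst.length → ∀ (s : Int) (m : Nat),
      summEndWhile lst ((c : Int) - 1) fuel s ((r : Int) - 1)
          ((m + (lst.length / 2 - r / 2) : Nat) : Int)
        = s + (((List.range r).reverse).map (fun i => pvTerm lst c lst.length m i)).sum := by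
  intro r
  induction r with
  | zero =>
      intro fuel _ _ s m
      cases fuel with
      | zero => simp [summEndWhile]
      | succ fuel => simp [summEndWhile]
  | succ r ih =>
      intro fuel hfuel hn s m
      cases fuel with
      | zero => omega
      | succ fuel =>
        rw [summEndWhile]
        have hi : (0 : Int) ≤ ((r + 1 : Nat) : Int) - 1 := by omega
        have hmod : PySem.Int.mod (((r + 1 : Nat) : Int) - 1) 2 = ((r % 2 : Nat) : Int) := by
          have : (((r + 1 : Nat) : Int) - 1) = (r : Int) := by push_cast; ring
          rw [this, pvModCast]
        by_cases hc : m + (lst.length / 2 - (r + 1) / 2) < c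
        · rw [if_pos]
          · have hstep : (((r + 1 : Nat) : Int) - 1) - 1 = ((r : Nat) : Int) - 1 := by
              push_cast; ring
            have hj : (if PySem.Int.mod (((r + 1 : Nat) : Int) - 1) 2 = 1
                  then ((m + (lst.length / 2 - (r + 1) / 2) : Nat) : Int) + 1
                  else ((m + (lst.length / 2 - (r + 1) / 2) : Nat) : Int))
                = ((m + (lst.length / 2 - r / 2) : Nat) : Int) := by
              rw [hmod]
              by_cases hpar : r % 2 = 0
              · rw [if_neg (by omega)]
                have : lst.length / 2 - (r + 1) / 2 = lst.length / 2 - r / 2 := by omega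
                rw [this]
              · rw [if_pos (by omega)]
                have : (m + (lst.length / 2 - r / 2) : Nat)
                    = (m + (lst.length / 2 - (r + 1) / 2) : Nat) + 1 := by omega
                rw [this]; push_cast; ring
            rw [hstep, hj, ih fuel (by omega) (by omega)]
            have hgetrow : PySem.List.pyGetD lst (((r + 1 : Nat) : Int) - 1) []
                = lst.getD r [] := by
              have : (((r + 1 : Nat) : Int) - 1) = ((r : Nat) : Int) := by push_cast; ring
              rw [this, PySem.List.pyGetD_natCast]
            have hgetcell :
                PySem.List.pyGetD (lst.getD r [])
                  ((m + (lst.length / 2 - (r + 1) / 2) : Nat) : Int) 0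
                = (lst.getD r []).getD (m + (lst.length / 2 - (r + 1) / 2)) 0 := by
              rw [PySem.List.pyGetD_natCast]
            rw [hgetrow, hgetcell]
            rw [List.range_succ, List.reverse_append]
            simp only [List.reverse_singleton, List.singleton_append, List.map_cons,
              List.sum_cons]
            rw [pvTerm, if_pos hc]
            ring
          · constructor
            · exact hi
            · push_cast; omega
        · rw [if_neg]
          · have : (((List.range (r + 1)).reverse).map
                (fun i => pvTerm lst c lst.length m i)).sum = 0 := by
              apply List.sum_eq_zero
              intro x hx
              simp only [List.mem_map, List.mem_reverse, List.mem_range] at hx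
              obtain ⟨i, hir, rfl⟩ := hx
              rw [pvTerm, if_neg (by omega)]
            rw [this]; ring
          · intro ⟨_, hle⟩
            have : (m + (lst.length / 2 - (r + 1) / 2) : Nat) < c := by
              have := hle
              push_cast at this
              omega
            omega

theorem pvGetDSet (l : List Int) (k : Nat) (v : Int) (m : Nat) (hk : k < l.length) :
    (l.set k v).getD m 0 = if m = k then v else l.getD m 0 := by
  by_cases hm : m = k
  · subst hm; rw [if_pos rfl]; simp [List.getD, hk]
  · rw [if_neg hm]
    have hk2 : ¬ k = m := fun h => hm h.symm
    simp [List.getD, hk2]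

-- B's inner loop, pointwise: bucket m gains the row cell of index m + offset, if it exists and is < c
theorem pvBInner (c offset : Nat) :
    ∀ (row : List Int) (a : Nat) (summ : List Int), summ.length = c →
      ((PySem.List.enumerate row (a : Int)).foldl
          (fun summ jv =>
            if (offset : Int) ≤ jv.1 ∧ jv.1 < (c : Int) then
              PySem.List.pySetD summ (jv.1 - (offset : Int))
                (PySem.List.pyGetD summ (jv.1 - (offset : Int)) 0 + jv.2)
            else summ) summ).length = c ∧
      ∀ m < c,
        ((PySem.List.enumerate row (a : Int)).foldl
            (fun summ jv =>
              if (offset : Int) ≤ jv.1 ∧ jv.1 < (c : Int) then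
                PySem.List.pySetD summ (jv.1 - (offset : Int))
                  (PySem.List.pyGetD summ (jv.1 - (offset : Int)) 0 + jv.2)
              else summ) summ).getD m 0
          = summ.getD m 0 +
            (if a ≤ m + offset ∧ m + offset < a + row.length ∧ m + offset < c
             then row.getD (m + offset - a) 0 else 0) := by
  intro row
  induction row with
  | nil =>
      intro a summ hlen
      refine ⟨by simpa [PySem.List.enumerate_nil] using hlen, ?_⟩
      intro m hm
      rw [if_neg (by simp only [List.length_nil]; omega)]
      simp [PySem.List.enumerate_nil]
  | cons x rest ih =>
      intro a summ hlen
      rw [PySem.List.enumerate_cons]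
      simp only [List.foldl_cons]
      have hcast : ((a : Int) + 1) = ((a + 1 : Nat) : Int) := by push_cast; ring
      by_cases h1 : offset ≤ a ∧ a < c
      · rw [if_pos (by constructor <;> [exact_mod_cast Int.ofNat_le.mpr h1.1;
            exact_mod_cast Int.ofNat_lt.mpr h1.2])]
        have hsub : ((a : Int) - (offset : Int)) = ((a - offset : Nat) : Int) := by
          omega
        rw [hsub, PySem.List.pyGetD_natCast, PySem.List.pySetD_natCast]
        set summ1 := summ.set (a - offset) (summ.getD (a - offset) 0 + x) with hsumm1
        have hlen1 : summ1.length = c := by simp [hsumm1, hlen]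
        rw [hcast]
        obtain ⟨ihlen, ihget⟩ := ih (a + 1) summ1 hlen1
        refine ⟨ihlen, ?_⟩
        intro m hm
        rw [ihget m hm]
        have hset : summ1.getD m 0
            = if m = a - offset then summ.getD (a - offset) 0 + x else summ.getD m 0 := by
          rw [hsumm1]; exact pvGetDSet summ (a - offset) _ m (by omega)
        rw [hset]
        by_cases hma : m = a - offset
        · subst hma
          rw [if_pos rfl, if_neg (by omega),
            if_pos ⟨by omega, by simp only [List.length_cons]; omega, by omega⟩]
          have : a - offset + offset - a = 0 := by omega
          rw [this]
          simp
        · rw [if_neg hma]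
          have hne : m + offset ≠ a := by omega
          by_cases h2 : a + 1 ≤ m + offset ∧ m + offset < a + 1 + rest.length ∧ m + offset < c
          · rw [if_pos h2,
              if_pos ⟨by omega, by simp only [List.length_cons]; omega, by omega⟩]
            have h3 : m + offset - a = (m + offset - (a + 1)) + 1 := by omega
            rw [h3, List.getD_cons_succ]
          · rw [if_neg h2, if_neg (by simp only [List.length_cons]; omega)]
      · rw [if_neg (by
          intro ⟨hA, hB⟩
          exact h1 ⟨by exact_mod_cast hA, by exact_mod_cast hB⟩)]
        rw [hcast]
        obtain ⟨ihlen, ihget⟩ := ih (a + 1) summ hlen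
        refine ⟨ihlen, ?_⟩
        intro m hm
        rw [ihget m hm]
        by_cases h2 : a + 1 ≤ m + offset ∧ m + offset < a + 1 + rest.length ∧ m + offset < c
        · rw [if_pos h2,
            if_pos ⟨by omega, by simp only [List.length_cons]; omega, by omega⟩]
          have h3 : m + offset - a = (m + offset - (a + 1)) + 1 := by omega
          rw [h3, List.getD_cons_succ]
        · rw [if_neg h2, if_neg (by simp only [List.length_cons]; omega)]

-- B's outer loop over rows r-1 … 0 starting at offset n/2 - r/2 adds every pvTerm of those rows
theorem pvBOuter (lst : List (List Int)) (c : Nat)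
    (hpre : ∀ i < lst.length,
      c ≤ lst.length / 2 - (i + 1) / 2 ∨ c ≤ (lst.getD i []).length) :
    ∀ (r : Nat), r ≤ lst.length → ∀ (g : Nat → Int),
      (PySem.List.pyRange ((r : Int) - 1) (-1) (-1)).foldl
        (fun st i =>
          (summEndAltRow (c : Int) st.2 st.1 (PySem.List.pyGetD lst i []),
           if PySem.Int.mod i 2 = 1 then st.2 + 1 else st.2))
        ((List.range c).map g, ((lst.length / 2 - r / 2 : Nat) : Int))
      = ((List.range c).map
          (fun m => g m + (((List.range r).reverse).map
            (fun i => pvTerm lst c lst.length m i)).sum),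
         ((lst.length / 2 : Nat) : Int)) := by
  intro r
  induction r with
  | zero =>
      intro _ g
      rw [PySem.List.pyRange_neg_one_eq_nil (by norm_num)]
      simp
  | succ r ih =>
      intro hn g
      have hcons : PySem.List.pyRange (((r + 1 : Nat) : Int) - 1) (-1) (-1)
          = ((r : Nat) : Int) :: PySem.List.pyRange (((r : Nat) : Int) - 1) (-1) (-1) := by
        have h1 : (((r + 1 : Nat) : Int) - 1) = ((r : Nat) : Int) := by push_cast; ring
        rw [h1, PySem.List.pyRange_neg_one_cons (by omega)]
      rw [hcons, List.foldl_cons]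
      -- the processed row
      have hrow : PySem.List.pyGetD lst ((r : Nat) : Int) [] = lst.getD r [] := by
        rw [PySem.List.pyGetD_natCast]
      have hlen : ((List.range c).map g).length = c := by simp
      obtain ⟨ilen, iget⟩ := pvBInner c (lst.length / 2 - (r + 1) / 2) (lst.getD r [])
        0 ((List.range c).map g) hlen
      have hrowres : summEndAltRow (c : Int) ((lst.length / 2 - (r + 1) / 2 : Nat) : Int)
            ((List.range c).map g) (PySem.List.pyGetD lst ((r : Nat) : Int) [])
          = (List.range c).map (fun m => g m + pvTerm lst c lst.length m r) := by
        rw [hrow]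
        apply List.ext_getElem
        · rw [summEndAltRow]
          simpa using ilen
        · intro m hm1 hm2
          simp only [List.length_map, List.length_range] at hm2
          have hres : (summEndAltRow (c : Int) ((lst.length / 2 - (r + 1) / 2 : Nat) : Int)
                ((List.range c).map g) (lst.getD r [])).getD m 0
              = g m + (if 0 ≤ m + (lst.length / 2 - (r + 1) / 2) ∧
                  m + (lst.length / 2 - (r + 1) / 2) < 0 + (lst.getD r []).length ∧
                  m + (lst.length / 2 - (r + 1) / 2) < c
                then (lst.getD r []).getD (m + (lst.length / 2 - (r + 1) / 2) - 0) 0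
                else 0) := by
            have hthis := iget m hm2
            have h0 : ((0 : Nat) : Int) = (0 : Int) := by norm_num
            rw [h0] at hthis
            have hgm : ((List.range c).map g).getD m 0 = g m := by
              rw [List.getD_eq_getElem _ _ (by simp [hm2])]
              simp
            rw [hgm] at hthis
            rw [summEndAltRow]
            exact hthis
          have hterm : (if 0 ≤ m + (lst.length / 2 - (r + 1) / 2) ∧
                  m + (lst.length / 2 - (r + 1) / 2) < 0 + (lst.getD r []).length ∧
                  m + (lst.length / 2 - (r + 1) / 2) < c
                then (lst.getD r []).getD (m + (lst.length / 2 - (r + 1) / 2) - 0) 0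
                else 0) = pvTerm lst c lst.length m r := by
            rw [pvTerm]
            rcases hpre r (by omega) with hcase | hcase
            · rw [if_neg (by omega), if_neg (by omega)]
            · by_cases hlt : m + (lst.length / 2 - (r + 1) / 2) < c
              · rw [if_pos (by omega), if_pos hlt]
                simp
              · rw [if_neg (by omega), if_neg hlt]
          rw [List.getElem_map, List.getElem_range]
          have hgd : (summEndAltRow (c : Int) ((lst.length / 2 - (r + 1) / 2 : Nat) : Int)
                ((List.range c).map g) (lst.getD r [])).getD m 0
              = (summEndAltRow (c : Int) ((lst.length / 2 - (r + 1) / 2 : Nat) : Int)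
                ((List.range c).map g) (lst.getD r []))[m] := by
            apply List.getD_eq_getElem
          rw [← hgd, hres, hterm]
      have hoff : (if PySem.Int.mod ((r : Nat) : Int) 2 = 1
            then ((lst.length / 2 - (r + 1) / 2 : Nat) : Int) + 1
            else ((lst.length / 2 - (r + 1) / 2 : Nat) : Int))
          = ((lst.length / 2 - r / 2 : Nat) : Int) := by
        rw [pvModCast]
        by_cases hpar : r % 2 = 0
        · rw [if_neg (by omega)]
          have : lst.length / 2 - (r + 1) / 2 = lst.length / 2 - r / 2 := by omega
          rw [this]
        · rw [if_pos (by omega)]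
          have : (lst.length / 2 - r / 2 : Nat) = (lst.length / 2 - (r + 1) / 2) + 1 := by
            omega
          rw [this]; push_cast; ring
      rw [hrowres, hoff, ih (by omega)]
      congr 1
      apply List.map_congr_left
      intro m _
      rw [List.range_succ, List.reverse_append]
      simp only [List.reverse_singleton, List.singleton_append, List.map_cons, List.sum_cons]
      ring

-- ===== VERDICT (by name: the statement is the Claim_ definition above) =====
theorem summ_end_spec : Claim_equal_summ_end := by
  intro lst _ hpre
  obtain ⟨hne, hrows⟩ := hpre
  unfold Spec_summ_end
  set n := lst.length with hn
  set c := (lst.getD 0 []).length with hc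
  have hc0 : PySem.List.pyGetD lst 0 [] = lst.getD 0 [] := by
    have : (0 : Int) = ((0 : Nat) : Int) := by norm_num
    rw [this, PySem.List.pyGetD_natCast]
  have hn1 : 1 ≤ n := by
    cases lst with
    | nil => exact absurd rfl hne
    | cons h t => simp [hn]
  -- ===== A side =====
  have hA : summ_end lst = (List.range c).map
      (fun m => 0 + (((List.range n).reverse).map
        (fun i => pvTerm lst c n m i)).sum) := by
    rw [summ_end]
    simp only [hc0]
    rw [PySem.List.foldl_append_singleton_eq_map, List.nil_append]
    by_cases hcz : c = 0
    · have hl : (lst[0]?.getD []).length = 0 := by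
        rw [← List.getD_eq_getElem?_getD]; omega
      simp [hcz, hl, PySem.List.pyRange_one_eq_nil]
    · have hylen : (PySem.List.pyRange 0 ((c : Nat) : Int) 1).length = c := by
        rw [PySem.List.length_pyRange_one]; omega
      have hylast : PySem.List.pyGetD (PySem.List.pyRange 0 ((c : Nat) : Int) 1) (-1) 0
          = (c : Int) - 1 := by
        have hsplit : PySem.List.pyRange 0 ((c : Nat) : Int) 1
            = PySem.List.pyRange 0 ((c : Int) - 1) 1 ++ [(c : Int) - 1] := by
          have h := PySem.List.pyRange_one_succ_right (a := 0) (b := (c : Int) - 1)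
            (by omega)
          rw [show ((c : Int) - 1 + 1) = ((c : Nat) : Int) from by ring] at h
          exact h
        rw [hsplit, PySem.List.pyGetD_neg_one_append_singleton]
      rw [← hc, hylen, hylast]
      rw [PySem.List.pyRange_one, List.map_map]
      have hcnat : (((c : Nat) : Int) - 0).toNat = c := by omega
      rw [hcnat]
      apply List.map_congr_left
      intro m hm
      simp only [Function.comp_apply, zero_add]
      have hjstart : ((m : Nat) : Int) = ((m + (n / 2 - n / 2) : Nat) : Int) := by
        simp
      have hex : ((lst.length : Int) - 1) = ((n : Int) - 1) := by rw [hn]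
      rw [hex, hjstart, pvALoop lst c n n (le_refl n) (by omega) 0 m]
      ring
  -- ===== B side =====
  have hB : summ_end_alt lst = (List.range c).map
      (fun m => 0 + (((List.range n).reverse).map
        (fun i => pvTerm lst c n m i)).sum) := by
    rw [summ_end_alt]
    simp only [hc0]
    have hrep : List.replicate ((c : Nat) : Int).toNat (0 : Int)
        = (List.range c).map (fun _ => (0 : Int)) := by
      simp [List.map_const']
    have hz : (0 : Int) = ((n / 2 - n / 2 : Nat) : Int) := by simp
    rw [← hc, hrep]
    have hlst : ((lst.length : Int) - 1) = ((n : Int) - 1) := by rw [hn]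
    rw [hlst, hz, pvBOuter lst c hrows n (le_refl n)]
  rw [hA, hB]
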